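-- pv_equiv track=rewrite | github.com/jeeseungbae/- | 프로그래머스/level2/최고의집합.py | solution
-- ===== SOURCE A (Python) =====
-- def solution(n, s):
--     answer = []
--     q = s//n
--     a = []
--     if q==0 :
--         answer = [-1]
--     elif s%n ==0 :
--         answer.append(q)
--         answer = answer * n
--     else :
--         answer.append(q)
--         answer = answer*n
--         for i in range(s%n):
--             answer[i]=answer[i]+1
--         answer.sort()
--     return answer
-- ===== SOURCE B (Python) =====
-- def solution(n, s):
--     if s // n == 0:
--         return [-1]
--     return [(s + i) // n for i in range(n)]
-- ===== Notes on version B (the rewrite author's own statement) =====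
-- stated objective: alternative
-- what changed: B computes each element of the sorted answer independently by the closed form (s+i)//n for i in range(n) (a standard fair-division identity), instead of A's build-replicate-increment-then-sort procedure.
import Mathlib
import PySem

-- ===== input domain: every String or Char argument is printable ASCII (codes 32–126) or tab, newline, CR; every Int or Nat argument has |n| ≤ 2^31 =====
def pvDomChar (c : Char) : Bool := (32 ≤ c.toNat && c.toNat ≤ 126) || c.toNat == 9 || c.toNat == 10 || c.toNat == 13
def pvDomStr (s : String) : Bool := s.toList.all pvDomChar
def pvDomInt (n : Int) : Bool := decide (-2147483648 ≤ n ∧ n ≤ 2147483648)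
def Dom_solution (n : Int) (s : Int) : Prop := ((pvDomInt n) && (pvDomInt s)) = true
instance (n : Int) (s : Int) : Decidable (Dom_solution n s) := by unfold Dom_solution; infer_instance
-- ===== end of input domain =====

-- B computes each element of the sorted answer by the closed form (s+i)//n per index,
-- replacing A's replicate/per-index-increment/sort procedure (objective: alternative).


-- ===== PORT A =====
-- answer[i] = answer[i] + 1 is ported as set/getD; every i drawn from range(s%n) is in range
-- (0 ≤ i < s%n < n = len(answer)), so getD's default is never read.
def solution (n : Int) (s : Int) : List Int :=
  let q := PySem.Int.floordiv s n
  if q = 0 then [-1]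
  else if PySem.Int.mod s n = 0 then
    List.replicate n.toNat q          -- [q] * n (empty for n ≤ 0, as in Python)
  else
    let ans := List.replicate n.toNat q
    let ans := (PySem.List.pyRange 0 (PySem.Int.mod s n) 1).foldl
        (fun a i => a.set i.toNat (a.getD i.toNat 0 + 1)) ans
    PySem.List.sorted ans (fun x => x) false

-- ===== PORT B =====
def solution_alt (n : Int) (s : Int) : List Int :=
  if PySem.Int.floordiv s n = 0 then [-1]
  else (PySem.List.pyRange 0 n 1).map (fun i => PySem.Int.floordiv (s + i) n)

-- ===== PRECONDITION & SPEC =====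
-- A computes s // n first, so n = 0 raises ZeroDivisionError; those inputs are excluded.
def Pre_solution (n : Int) (s : Int) : Prop := n ≠ 0
instance (n : Int) (s : Int) : Decidable (Pre_solution n s) := by unfold Pre_solution; infer_instance
def pvWitness_solution : Int × Int := (3, 7)

def Spec_solution (n : Int) (s : Int) (out : List Int) : Prop := out = solution_alt n s
instance (n : Int) (s : Int) (out : List Int) : Decidable (Spec_solution n s out) := by unfold Spec_solution; infer_instance

-- ===== CLAIM (what is proved, stated in full; the proofs are below) =====
def Claim_equal_solution : Prop := ∀ (n : Int) (s : Int), Dom_solution n s → Pre_solution n s → Spec_solution n s (solution n s)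

-- ===== LEMMAS AND PROOFS =====

-- After processing range(0, k), the first k entries of [q]*m have been bumped to q+1.
lemma loop_replicate (q : Int) (m k : Nat) (hk : k ≤ m) :
    (PySem.List.pyRange 0 (k : Int) 1).foldl
      (fun a i => a.set i.toNat (a.getD i.toNat 0 + 1)) (List.replicate m q)
    = List.replicate k (q + 1) ++ List.replicate (m - k) q := by
  induction k with
  | zero => simp [PySem.List.pyRange]
  | succ k ih =>
    have hk' : k ≤ m := Nat.le_of_succ_le hk
    have hsplit : PySem.List.pyRange 0 ((k + 1 : Nat) : Int) 1
        = PySem.List.pyRange 0 (k : Int) 1 ++ [(k : Int)] := by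
      have := PySem.List.pyRange_one_succ_right (a := 0) (b := (k : Int)) (by positivity)
      push_cast
      push_cast at this
      simpa using this
    rw [hsplit, List.foldl_append, ih hk']
    simp only [List.foldl_cons, List.foldl_nil, Int.toNat_natCast]
    have hmk : m - k = (m - k - 1) + 1 := by omega
    rw [hmk, List.replicate_succ]
    have hlen : (List.replicate k (q + 1)).length = k := by simp
    rw [List.getD_eq_getElem?_getD, List.getElem?_append_right (by simp)]
    simp only [hlen, Nat.sub_self, List.getElem?_cons_zero, Option.getD_some]
    rw [List.set_append_right _ _ (by simp)]
    simp only [hlen, Nat.sub_self, List.set_cons_zero]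
    rw [show List.replicate (k + 1) (q + 1) = List.replicate k (q + 1) ++ [q + 1] by
      simp [List.replicate_succ']]
    simp only [List.append_assoc, List.singleton_append]
    congr 2

lemma sorted_two_blocks (q : Int) (a b : Nat) :
    PySem.List.sorted (List.replicate b (q + 1) ++ List.replicate a q) (fun x => x) false
    = List.replicate a q ++ List.replicate b (q + 1) := by
  apply PySem.List.eq_of_perm_of_pairwise_le_of_injective (key := fun x => x) (fun _ _ h => h)
  · exact (PySem.List.sorted_perm _ _ _).trans List.perm_append_comm
  · exact PySem.List.sorted_pairwise _ _
  · simp [List.pairwise_append, List.pairwise_replicate]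

-- For 0 < n, the map i ↦ (s + i) // n over range(n) is the two-block list A produces.
lemma map_formula (n s : Int) (hpos : 0 < n) :
    (PySem.List.pyRange 0 n 1).map (fun i => PySem.Int.floordiv (s + i) n)
    = List.replicate (n - PySem.Int.mod s n).toNat (PySem.Int.floordiv s n)
      ++ List.replicate (PySem.Int.mod s n).toNat (PySem.Int.floordiv s n + 1) := by
  set q := PySem.Int.floordiv s n with hq
  set r := PySem.Int.mod s n with hr
  have hs : q * n + r = s := PySem.Int.floordiv_mul_add_mod s n
  have hr0 : 0 ≤ r := PySem.Int.mod_nonneg s hpos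
  have hrn : r < n := PySem.Int.mod_lt s hpos
  apply List.ext_getElem
  · simp [PySem.List.length_pyRange_one]; omega
  · intro k hk1 hk2
    have hkn : (k : Int) < n := by
      simp [PySem.List.length_pyRange_one] at hk1; omega
    rw [List.getElem_map, PySem.List.getElem_pyRange_one]
    by_cases hcase : (k : Int) < n - r
    · rw [List.getElem_append_left (by simp; omega), List.getElem_replicate]
      rw [PySem.Int.floordiv_eq_iff_of_pos hpos]
      constructor <;> linarith
    · rw [List.getElem_append_right (by simp; omega), List.getElem_replicate]
      rw [PySem.Int.floordiv_eq_iff_of_pos hpos]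
      constructor <;> linarith

-- ===== VERDICT (by name: the statement is the Claim_ definition above) =====
theorem solution_spec : Claim_equal_solution := by
  intro n s _ hn
  unfold Spec_solution solution solution_alt
  simp only []
  by_cases hq : PySem.Int.floordiv s n = 0
  · simp [hq]
  · simp only [hq, if_false]
    rcases lt_or_gt_of_ne hn with hneg | hpos
    · -- n < 0: both sides are empty lists
      have hrange : PySem.List.pyRange 0 n 1 = [] :=
        PySem.List.pyRange_one_eq_nil (by omega)
      rw [hrange]
      by_cases hr : PySem.Int.mod s n = 0
      · simp [hr]; omega
      · simp only [hr, if_false]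
        have hb := PySem.Int.mod_neg_bounds (a := s) (b := n) hneg
        have hrange2 : PySem.List.pyRange 0 (PySem.Int.mod s n) 1 = [] :=
          PySem.List.pyRange_one_eq_nil (by omega)
        have h1 : n.toNat = 0 := by omega
        rw [hrange2]
        simp [h1, PySem.List.sorted]
    · -- n > 0
      rw [map_formula n s hpos]
      by_cases hr : PySem.Int.mod s n = 0
      · simp [hr]
      · simp only [hr, if_false]
        have hr0 : 0 ≤ PySem.Int.mod s n := PySem.Int.mod_nonneg s hpos
        have hrn : PySem.Int.mod s n < n := PySem.Int.mod_lt s hpos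
        set r := PySem.Int.mod s n with hrdef
        have hcast : r = ((r.toNat : Nat) : Int) := (Int.toNat_of_nonneg hr0).symm
        have hkm : r.toNat ≤ n.toNat := by omega
        rw [hcast, loop_replicate _ _ _ hkm, sorted_two_blocks]
        rw [← hcast]
        have : (n - r).toNat = n.toNat - r.toNat := by omega
        rw [this]
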